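-- pv_equiv track=rewrite | github.com/TheFloatingString/user-models | src/refusal_metrics.py | tally_refusal_categories
-- ===== SOURCE A (Python) =====
-- from typing import Any
--
-- def tally_refusal_categories(
--     records: list[dict[str, Any]],
-- ) -> dict[str, dict[str, int]]:
--     """Count refusal categories by question category."""
--     counts: dict[str, dict[str, int]] = {}
--     for record in records:
--         category = str(record.get("category", "unknown"))
--         label = record.get("refusal_category", "NO_REFUSAL")
--         if label not in {"HARD_REFUSAL", "SOFT_REFUSAL", "NO_REFUSAL"}:
--             label = "NO_REFUSAL"
--         bucket = counts.setdefault(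
--             category,
--             {"HARD_REFUSAL": 0, "SOFT_REFUSAL": 0, "NO_REFUSAL": 0},
--         )
--         bucket[label] += 1
--     return counts
-- ===== SOURCE B (Python) =====
-- def tally_refusal_categories(records):
--     """Count refusal categories by question category: flat (category, label)
--     counting pass, then a reshape pass into nested per-category buckets."""
--     flat = {}
--     for record in records:
--         category = str(record.get("category", "unknown"))
--         label = record.get("refusal_category", "NO_REFUSAL")
--         if label not in {"HARD_REFUSAL", "SOFT_REFUSAL", "NO_REFUSAL"}:
--             label = "NO_REFUSAL"
--         key = (category, label)
--         flat[key] = flat.get(key, 0) + 1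
--     out = {}
--     for (category, label), n in flat.items():
--         if category not in out:
--             out[category] = {"HARD_REFUSAL": 0, "SOFT_REFUSAL": 0, "NO_REFUSAL": 0}
--         out[category][label] = n
--     return out
-- ===== Notes on version B (the rewrite author's own statement) =====
-- stated objective: alternative
-- what changed: A mutates nested per-category buckets in place via setdefault while scanning; B first counts into a flat dict keyed by (category,label) tuples and then reshapes that counter into the nested pre-seeded buckets in a second pass.
import Mathlib
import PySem

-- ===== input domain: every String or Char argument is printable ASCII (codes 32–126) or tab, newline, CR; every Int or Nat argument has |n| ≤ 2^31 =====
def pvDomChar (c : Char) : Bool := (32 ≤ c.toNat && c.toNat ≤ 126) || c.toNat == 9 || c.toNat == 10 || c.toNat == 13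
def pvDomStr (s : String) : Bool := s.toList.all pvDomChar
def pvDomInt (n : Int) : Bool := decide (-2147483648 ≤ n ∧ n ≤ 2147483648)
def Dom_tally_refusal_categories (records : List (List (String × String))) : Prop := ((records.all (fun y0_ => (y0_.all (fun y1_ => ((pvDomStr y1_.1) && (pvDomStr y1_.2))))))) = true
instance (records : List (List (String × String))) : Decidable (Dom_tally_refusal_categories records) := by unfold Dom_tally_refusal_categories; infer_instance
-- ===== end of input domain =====

-- B replaces A's in-place nested-bucket mutation by a flat (category,label)-keyed counting
-- pass followed by a reshape pass into pre-seeded buckets (objective: alternative decomposition).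

-- ===== PORT A =====
-- the fresh bucket {"HARD_REFUSAL": 0, "SOFT_REFUSAL": 0, "NO_REFUSAL": 0}
def pvDef3 : PySem.Dict String Int :=
  PySem.Dict.mk [("HARD_REFUSAL", 0), ("SOFT_REFUSAL", 0), ("NO_REFUSAL", 0)]

-- str(record.get("category", "unknown")); str() is the identity on these string values
def pvCat (record : List (String × String)) : String :=
  (PySem.Dict.mk record).getD "category" "unknown"

-- record.get("refusal_category", "NO_REFUSAL"), coerced into the three-label set
def pvLab (record : List (String × String)) : String :=
  let label := (PySem.Dict.mk record).getD "refusal_category" "NO_REFUSAL"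
  if label = "HARD_REFUSAL" ∨ label = "SOFT_REFUSAL" ∨ label = "NO_REFUSAL" then label
  else "NO_REFUSAL"

def tally_refusal_categories (records : List (List (String × String))) :
    List (String × List (String × Int)) :=
  (records.foldl
    (fun counts record =>
      let category := pvCat record
      let label := pvLab record
      -- bucket = counts.setdefault(category, {...}); bucket[label] += 1 (label is always
      -- a key of the bucket, so the in-place += is a modify of counts[category])
      let counts' := counts.setdefault category pvDef3
      counts'.modify category PySem.Dict.empty (fun bucket => bucket.modify label 0 (· + 1)))
    PySem.Dict.empty).items.map (fun p => (p.1, p.2.items))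

-- ===== PORT B =====
def tally_refusal_categories_alt (records : List (List (String × String))) :
    List (String × List (String × Int)) :=
  let flat := records.foldl
    (fun flat record =>
      let key := (pvCat record, pvLab record)
      flat.insert key (flat.getD key 0 + 1))
    PySem.Dict.empty
  let out := flat.items.foldl
    (fun out p =>
      let out' := if out.contains p.1.1 then out else out.insert p.1.1 pvDef3
      -- out[category][label] = n  (category is a key of out', label one of the three)
      out'.insert p.1.1 ((out'.getD p.1.1 PySem.Dict.empty).insert p.1.2 p.2))
    PySem.Dict.empty
  out.items.map (fun p => (p.1, p.2.items))

-- ===== PRECONDITION & SPEC =====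
def Spec_tally_refusal_categories (records : List (List (String × String))) (out : List (String × List (String × Int))) : Prop := out = tally_refusal_categories_alt records
instance (records : List (List (String × String))) (out : List (String × List (String × Int))) : Decidable (Spec_tally_refusal_categories records out) := by unfold Spec_tally_refusal_categories; infer_instance

-- ===== CLAIM (what is proved, stated in full; the proofs are below) =====
def Claim_equal_tally_refusal_categories : Prop := ∀ (records : List (List (String × String))), Dom_tally_refusal_categories records → Spec_tally_refusal_categories records (tally_refusal_categories records)

-- ===== LEMMAS AND PROOFS =====

-- the normalized label of every record is one of the three bucket keys
lemma pvLab_mem_three (r : List (String × String)) :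
    pvLab r = "HARD_REFUSAL" ∨ pvLab r = "SOFT_REFUSAL" ∨ pvLab r = "NO_REFUSAL" := by
  unfold pvLab
  by_cases h : ((PySem.Dict.mk r).getD "refusal_category" "NO_REFUSAL") = "HARD_REFUSAL" ∨
      ((PySem.Dict.mk r).getD "refusal_category" "NO_REFUSAL") = "SOFT_REFUSAL" ∨
      ((PySem.Dict.mk r).getD "refusal_category" "NO_REFUSAL") = "NO_REFUSAL"
  · simpa [h] using h
  · simp [h]

-- common shape of one outer-loop step of both programs: replace category c's bucket
def pvUpd (o : PySem.Dict String (PySem.Dict String Int)) (c : String)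
    (g : PySem.Dict String Int → PySem.Dict String Int) :
    PySem.Dict String (PySem.Dict String Int) :=
  (o.setdefault c pvDef3).insert c (g (o.getD c pvDef3))

-- reading the bucket just after setdefault: the default is never used
lemma pvSetdefault_getD (o : PySem.Dict String (PySem.Dict String Int)) (c : String) :
    (o.setdefault c pvDef3).getD c PySem.Dict.empty = o.getD c pvDef3 := by
  rw [PySem.Dict.getD_eq_get?_getD, PySem.Dict.get?_setdefault_self,
    PySem.Dict.getD_eq_get?_getD]
  cases o.get? c <;> rfl

lemma pvUpd_keys (o : PySem.Dict String (PySem.Dict String Int)) (c : String) (g) :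
    (pvUpd o c g).keys = PySem.Set.add o.keys c := by
  unfold pvUpd
  rw [PySem.Dict.keys_insert_of_contains _ _ (by simp [PySem.Dict.contains_setdefault]),
    PySem.Dict.keys_setdefault]
  have hc : o.contains c = PySem.Set.contains o.keys c := by
    by_cases h : o.contains c = true
    · rw [h, Eq.comm, (PySem.Set.contains_iff _ _), ← PySem.Dict.contains_iff_mem_keys]; exact h
    · have h' : o.contains c = false := by simpa using h
      rw [h']
      by_cases h2 : PySem.Set.contains o.keys c = true
      · exact absurd ((PySem.Dict.contains_iff_mem_keys o c).mpr ((PySem.Set.contains_iff _ _).mp h2)) (by simp [h'])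
      · simpa using (Ne.symm h2)
  rw [PySem.Set.add, ← hc]

lemma pvUpd_getD (o : PySem.Dict String (PySem.Dict String Int)) (c c' : String) (g) :
    (pvUpd o c g).getD c' pvDef3 = if c' = c then g (o.getD c pvDef3) else o.getD c' pvDef3 := by
  unfold pvUpd
  rw [PySem.Dict.getD_insert]
  by_cases h : c' = c
  · simp [h]
  · rw [if_neg h, if_neg h, PySem.Dict.getD_eq_get?_getD, PySem.Dict.get?_setdefault_of_ne _ _ h,
      PySem.Dict.getD_eq_get?_getD]

-- dedup commutes with map (first-appearance order is preserved)
lemma pvSet_update_map {α β : Type} [BEq α] [LawfulBEq α] [BEq β] [LawfulBEq β]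
    (f : α → β) (xs : List α) : ∀ (s : PySem.Set α),
    PySem.Set.ofList ((PySem.Set.update s xs).map f)
      = PySem.Set.update (PySem.Set.ofList (s.map f)) (xs.map f) := by
  induction xs with
  | nil => intro s; simp [PySem.Set.update_nil]
  | cons x xs ih =>
    intro s
    rw [PySem.Set.update_cons, List.map_cons, PySem.Set.update_cons, ih]
    congr 1
    rw [PySem.Set.add]
    by_cases h : PySem.Set.contains s x = true
    · rw [if_pos h, Eq.comm,
        PySem.Set.add_of_mem ((PySem.Set.mem_ofList _ _).mpr
          (List.mem_map_of_mem ((PySem.Set.contains_iff s x).mp h)))]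
    · rw [if_neg h, List.map_append, PySem.Set.ofList_append, List.map_singleton,
        PySem.Set.update_cons, PySem.Set.update_nil]

lemma pvSet_ofList_map {α β : Type} [BEq α] [LawfulBEq α] [BEq β] [LawfulBEq β]
    (f : α → β) (xs : List α) :
    PySem.Set.ofList ((PySem.Set.ofList xs).map f) = PySem.Set.ofList (xs.map f) := by
  have := pvSet_update_map f xs (PySem.Set.empty)
  simpa [PySem.Set.update_empty] using this

-- update by already-present elements is the identity

-- update by already-present elements is the identity
lemma pvSet_update_of_subset {α : Type} [BEq α] [LawfulBEq α] (s : PySem.Set α) (xs : List α)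
    (h : ∀ x ∈ xs, x ∈ s) : PySem.Set.update s xs = s := by
  rw [PySem.Set.update_eq_append_filter]
  have : (PySem.Set.ofList xs).filter (fun y => !PySem.Set.contains s y) = [] := by
    rw [List.filter_eq_nil_iff]
    intro a ha
    have : a ∈ s := h a ((PySem.Set.mem_ofList _ _).mp ha)
    simpa [PySem.Set.contains] using this
  rw [this, List.append_nil]

-- a fold of pvUpd steps: the keys are the first-appearance categories
lemma pvFoldUpd_keys {β : Type} (l : List β) (key : β → String)
    (g : β → PySem.Dict String Int → PySem.Dict String Int) :
    ∀ (o : PySem.Dict String (PySem.Dict String Int)),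
    (l.foldl (fun o x => pvUpd o (key x) (g x)) o).keys
      = PySem.Set.update o.keys (l.map key) := by
  induction l with
  | nil => intro o; simp [PySem.Set.update_nil]
  | cons x xs ih =>
    intro o
    rw [List.foldl_cons, ih, pvUpd_keys, List.map_cons, PySem.Set.update_cons]

-- a fold of pvUpd steps: each bucket is the fold of its own category's updates
lemma pvFoldUpd_getD {β : Type} (l : List β) (key : β → String)
    (g : β → PySem.Dict String Int → PySem.Dict String Int) (c : String) :
    ∀ (o : PySem.Dict String (PySem.Dict String Int)),
    (l.foldl (fun o x => pvUpd o (key x) (g x)) o).getD c pvDef3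
      = (l.filter (fun x => key x = c)).foldl (fun b x => g x b) (o.getD c pvDef3) := by
  induction l with
  | nil => intro o; rfl
  | cons x xs ih =>
    intro o
    rw [List.foldl_cons, ih, List.filter_cons]
    by_cases h : key x = c
    · rw [if_pos (by simpa using h), List.foldl_cons, pvUpd_getD, if_pos h.symm, h]
    · rw [if_neg (by simpa using h), pvUpd_getD, if_neg (fun hc => h hc.symm)]

lemma pvFoldInsert_getD_notmem {β : Type} (P : List β) (key : β → String) (val : β → Int) :
    ∀ (d : PySem.Dict String Int) (lab : String), lab ∉ P.map key →
    (P.foldl (fun d x => d.insert (key x) (val x)) d).getD lab 0 = d.getD lab 0 := by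
  induction P with
  | nil => intro d lab _; rfl
  | cons x xs ih =>
    intro d lab h
    simp only [List.map_cons, List.mem_cons, not_or] at h
    rw [List.foldl_cons, ih _ _ h.2, PySem.Dict.getD_insert, if_neg h.1]

-- a fold of inserts with pairwise-distinct keys, read back at one key
lemma pvFoldInsert_getD {β : Type} (P : List β) (key : β → String) (val : β → Int) :
    ∀ (d : PySem.Dict String Int) (lab : String), (P.map key).Nodup →
    (P.foldl (fun d x => d.insert (key x) (val x)) d).getD lab 0
      = match P.find? (fun x => key x == lab) with
        | some x => val x
        | none => d.getD lab 0 := by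
  induction P with
  | nil => intro d lab _; rfl
  | cons x xs ih =>
    intro d lab hnd
    simp only [List.map_cons, List.nodup_cons] at hnd
    rw [List.foldl_cons, List.find?_cons]
    by_cases h : key x = lab
    · have hb : (key x == lab) = true := by simpa using h
      rw [hb]
      have : lab ∉ xs.map key := h ▸ hnd.1
      rw [pvFoldInsert_getD_notmem xs key val _ _ this, PySem.Dict.getD_insert, if_pos h.symm]
    · have hb : (key x == lab) = false := by simpa using h
      rw [hb, ih _ _ hnd.2]
      cases xs.find? (fun x => key x == lab) with
      | some y => rfl
      | none => simp only [PySem.Dict.getD_insert, if_neg (fun hc : lab = key x => h hc.symm)]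

-- keys of a bucket stay the three labels through A's modify loop

-- keys of a bucket stay the three labels through A's modify loop
lemma pvBucketA_keys (ls : List String)
    (h : ∀ l ∈ ls, l = "HARD_REFUSAL" ∨ l = "SOFT_REFUSAL" ∨ l = "NO_REFUSAL") :
    (ls.foldl (fun b l => b.modify l 0 (· + 1)) pvDef3).keys = pvDef3.keys := by
  rw [PySem.Dict.keys_foldl_modify ls 0 (fun _ _ => (· + 1)) pvDef3]
  exact pvSet_update_of_subset _ _ (fun l hl => by
    rcases h l hl with h | h | h <;> simp [h, pvDef3, PySem.Dict.keys])

-- the common normal form both programs are reduced to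
def pvKs (records : List (List (String × String))) : List (String × String) :=
  records.map (fun r => (pvCat r, pvLab r))

def pvCnt (records : List (List (String × String))) (c lab : String) : Int :=
  ((pvKs records).count (c, lab) : Int)

def pvNorm (records : List (List (String × String))) : List (String × List (String × Int)) :=
  (PySem.Set.ofList (records.map pvCat)).map (fun c =>
    (c, [("HARD_REFUSAL", pvCnt records c "HARD_REFUSAL"),
         ("SOFT_REFUSAL", pvCnt records c "SOFT_REFUSAL"),
         ("NO_REFUSAL", pvCnt records c "NO_REFUSAL")]))

-- the label-count of A's per-category sublist is the flat pair count

-- the label-count of A's per-category sublist is the flat pair count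
lemma pvCount_eq (records : List (List (String × String))) (c lab : String) :
    ((records.filter (fun r => pvCat r = c)).map pvLab).count lab
      = (pvKs records).count (c, lab) := by
  unfold pvKs
  rw [List.count_eq_countP, List.count_eq_countP, List.countP_map, List.countP_map,
    List.countP_filter]
  apply List.countP_congr
  intro r _
  by_cases h1 : pvCat r = c <;> by_cases h2 : pvLab r = lab <;>
    simp [h1, h2, Function.comp, Prod.ext_iff]

-- A's bucket for category c, as a literal items list

-- A's bucket for category c, as a literal items list
lemma pvBucketA_items (records : List (List (String × String))) (c : String) :
    ((records.filter (fun r => pvCat r = c)).foldl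
        (fun b r => b.modify (pvLab r) 0 (· + 1)) pvDef3).items
      = [("HARD_REFUSAL", pvCnt records c "HARD_REFUSAL"),
         ("SOFT_REFUSAL", pvCnt records c "SOFT_REFUSAL"),
         ("NO_REFUSAL", pvCnt records c "NO_REFUSAL")] := by
  have hfold : (records.filter (fun r => pvCat r = c)).foldl
      (fun b r => b.modify (pvLab r) 0 (· + 1)) pvDef3
      = ((records.filter (fun r => pvCat r = c)).map pvLab).foldl
        (fun (b : PySem.Dict String Int) l => b.modify l 0 (· + 1)) pvDef3 :=
    (List.foldl_map (f := pvLab)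
      (g := fun (d : PySem.Dict String Int) (x : String) => d.modify x 0 (· + 1))).symm
  rw [hfold]
  set ls := (records.filter (fun r => pvCat r = c)).map pvLab with hls
  have hmem : ∀ l ∈ ls, l = "HARD_REFUSAL" ∨ l = "SOFT_REFUSAL" ∨ l = "NO_REFUSAL" := by
    intro l hl
    obtain ⟨r, _, hr⟩ := List.mem_map.mp hl
    exact hr ▸ pvLab_mem_three r
  have hkeys := pvBucketA_keys ls hmem
  have hnd : ((ls.foldl (fun b l => b.modify l 0 (· + 1)) pvDef3)).keys.Nodup := by
    rw [hkeys]; decide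
  rw [PySem.Dict.items_eq_map_keys _ hnd 0, hkeys,
    show pvDef3.keys = ["HARD_REFUSAL", "SOFT_REFUSAL", "NO_REFUSAL"] from rfl]
  have hc : ∀ lab, ((ls.foldl (fun b l => b.modify l 0 (· + 1)) pvDef3)).getD lab 0
      = pvDef3.getD lab 0 + (ls.count lab : Int) := by
    intro lab
    exact PySem.Dict.getD_foldl_modify_add_one ls pvDef3 lab
  simp only [List.map_cons, List.map_nil, hc]
  rw [hls]
  simp only [pvCount_eq records c]
  norm_num [pvCnt, pvDef3, PySem.Dict.getD, PySem.Dict.get?]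
  decide

lemma pvA_norm (records : List (List (String × String))) :
    tally_refusal_categories records = pvNorm records := by
  have hstep : (fun (counts : PySem.Dict String (PySem.Dict String Int)) record =>
      let category := pvCat record
      let label := pvLab record
      let counts' := counts.setdefault category pvDef3
      counts'.modify category PySem.Dict.empty (fun bucket => bucket.modify label 0 (· + 1)))
      = fun o r => pvUpd o (pvCat r) (fun b => b.modify (pvLab r) 0 (· + 1)) := by
    funext o r
    simp only [pvUpd, PySem.Dict.modify, pvSetdefault_getD]
  unfold tally_refusal_categories
  rw [hstep]
  have hk := pvFoldUpd_keys records pvCat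
    (fun r => fun b => b.modify (pvLab r) 0 (· + 1)) PySem.Dict.empty
  have hg := pvFoldUpd_getD records pvCat
    (fun r => fun b => b.modify (pvLab r) 0 (· + 1))
  have hkeys : (records.foldl
      (fun o r => pvUpd o (pvCat r) (fun b => b.modify (pvLab r) 0 (· + 1)))
      PySem.Dict.empty).keys = PySem.Set.ofList (records.map pvCat) := by
    rw [hk]
    simp [PySem.Dict.keys_empty, PySem.Set.update_nil_left]
  have hnd := hkeys ▸ PySem.Set.nodup_ofList (records.map pvCat)
  rw [PySem.Dict.items_eq_map_keys _ hnd pvDef3, hkeys, List.map_map]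
  unfold pvNorm
  apply List.map_congr_left
  intro c _
  simp only [Function.comp_apply]
  rw [hg c PySem.Dict.empty]
  have hempty : (PySem.Dict.empty : PySem.Dict String (PySem.Dict String Int)).getD c pvDef3 = pvDef3 := rfl
  rw [hempty, pvBucketA_items]

-- B's bucket for category c, as a literal items list

-- B's bucket for category c, as a literal items list
lemma pvBucketB_items (records : List (List (String × String))) (c : String) :
    ((((PySem.Dict.counter (pvKs records)).items).filter (fun p => p.1.1 = c)).foldl
        (fun b p => b.insert p.1.2 p.2) pvDef3).items
      = [("HARD_REFUSAL", pvCnt records c "HARD_REFUSAL"),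
         ("SOFT_REFUSAL", pvCnt records c "SOFT_REFUSAL"),
         ("NO_REFUSAL", pvCnt records c "NO_REFUSAL")] := by
  set ks := pvKs records with hks
  rw [PySem.Dict.items_counter, List.filter_map]
  set S' := (PySem.Set.ofList ks).filter
    ((fun (p : (String × String) × Int) => decide (p.1.1 = c)) ∘ (fun k => (k, (ks.count k : Int)))) with hS'
  have hfold : (S'.map (fun k => (k, (ks.count k : Int)))).foldl
      (fun (b : PySem.Dict String Int) p => b.insert p.1.2 p.2) pvDef3
      = S'.foldl (fun (b : PySem.Dict String Int) k => b.insert k.2 (ks.count k : Int)) pvDef3 :=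
    List.foldl_map (f := fun k => (k, (ks.count k : Int)))
      (g := fun (b : PySem.Dict String Int) (p : (String × String) × Int) => b.insert p.1.2 p.2)
  rw [hfold]
  have hmemS' : ∀ k ∈ S', k ∈ ks ∧ k.1 = c := by
    intro k hk
    obtain ⟨h1, h2⟩ := List.mem_filter.mp hk
    exact ⟨(PySem.Set.mem_ofList _ _).mp h1, by simpa using h2⟩
  have hndS' : S'.Nodup := List.Nodup.filter _ (PySem.Set.nodup_ofList ks)
  have hnd2 : (S'.map (fun k => k.2)).Nodup := by
    refine (List.nodup_map_iff_inj_on hndS').mpr ?_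
    intro p hp q hq he
    have h1 := (hmemS' p hp).2
    have h2 := (hmemS' q hq).2
    exact Prod.ext_iff.mpr ⟨h1.trans h2.symm, he⟩
  have hlabmem : ∀ k ∈ ks, k.2 = "HARD_REFUSAL" ∨ k.2 = "SOFT_REFUSAL" ∨ k.2 = "NO_REFUSAL" := by
    intro k hk
    obtain ⟨r, _, hr⟩ := List.mem_map.mp (hks ▸ hk)
    exact hr ▸ pvLab_mem_three r
  -- keys stay the three labels
  have hkeys : (S'.foldl (fun (b : PySem.Dict String Int) k => b.insert k.2 (ks.count k : Int)) pvDef3).keys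
      = pvDef3.keys := by
    rw [PySem.Dict.keys_foldl_insert_key S' (fun k => k.2)
      (fun _ k => (ks.count k : Int)) pvDef3]
    refine pvSet_update_of_subset _ _ ?_
    intro lab hlab
    obtain ⟨k, hk, hk2⟩ := List.mem_map.mp hlab
    rcases hlabmem k (hmemS' k hk).1 with h | h | h <;>
      simp [← hk2, h, pvDef3, PySem.Dict.keys]
  have hndk : (S'.foldl (fun (b : PySem.Dict String Int) k => b.insert k.2 (ks.count k : Int)) pvDef3).keys.Nodup := by
    rw [hkeys]; decide
  have hget : ∀ lab : String, pvDef3.getD lab 0 = 0 →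
      (S'.foldl (fun (b : PySem.Dict String Int) k => b.insert k.2 (ks.count k : Int)) pvDef3).getD lab 0
        = (ks.count (c, lab) : Int) := by
    intro lab h0
    rw [pvFoldInsert_getD S' (fun k => k.2) (fun k => (ks.count k : Int)) pvDef3 lab hnd2]
    cases hf : S'.find? (fun k => k.2 == lab) with
    | some k =>
      simp only
      have hk := List.mem_of_find?_eq_some hf
      have hpred : k.2 = lab := by simpa using List.find?_some hf
      have hc : k.1 = c := (hmemS' k hk).2
      have : k = (c, lab) := Prod.ext_iff.mpr ⟨hc, hpred⟩
      rw [this]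
    | none =>
      simp only
      have hnotmem : (c, lab) ∉ ks := by
        intro hmem
        have h1 : (c, lab) ∈ S' := List.mem_filter.mpr
          ⟨(PySem.Set.mem_ofList _ _).mpr hmem, by simp⟩
        have := List.find?_eq_none.mp hf _ h1
        simp at this
      rw [h0, List.count_eq_zero.mpr hnotmem]
      rfl
  rw [PySem.Dict.items_eq_map_keys _ hndk 0, hkeys,
    show pvDef3.keys = ["HARD_REFUSAL", "SOFT_REFUSAL", "NO_REFUSAL"] from rfl]
  simp only [List.map_cons, List.map_nil]
  rw [hget "HARD_REFUSAL" rfl, hget "SOFT_REFUSAL" rfl, hget "NO_REFUSAL" rfl]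
  rfl

-- B's reshape-loop body is a pvUpd
lemma pvStepB_eq :
    (fun (out : PySem.Dict String (PySem.Dict String Int)) (p : (String × String) × Int) =>
      let out' := if out.contains p.1.1 then out else out.insert p.1.1 pvDef3
      out'.insert p.1.1 ((out'.getD p.1.1 PySem.Dict.empty).insert p.1.2 p.2))
    = fun out p => pvUpd out p.1.1 (fun b => b.insert p.1.2 p.2) := by
  funext o p
  simp only [pvUpd]
  have h : (if o.contains p.1.1 then o else o.insert p.1.1 pvDef3)
      = o.setdefault p.1.1 pvDef3 := by
    by_cases h : o.contains p.1.1 = true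
    · rw [if_pos h, PySem.Dict.setdefault_of_contains _ _ h]
    · have h' : o.contains p.1.1 = false := by simpa using h
      rw [if_neg h, PySem.Dict.setdefault_of_not_contains _ _ h', PySem.Dict.insert, if_neg (by simp [h'])]
  simp only [h, pvSetdefault_getD]

lemma pvB_norm (records : List (List (String × String))) :
    tally_refusal_categories_alt records = pvNorm records := by
  unfold tally_refusal_categories_alt
  have hflat : records.foldl
      (fun flat record =>
        let key := (pvCat record, pvLab record)
        flat.insert key (flat.getD key 0 + 1))
      PySem.Dict.empty = PySem.Dict.counter (pvKs records) := by
    have h1 : records.foldl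
        (fun (flat : PySem.Dict (String × String) Int) record =>
          let key := (pvCat record, pvLab record)
          flat.insert key (flat.getD key 0 + 1))
        PySem.Dict.empty
        = (pvKs records).foldl
          (fun (d : PySem.Dict (String × String) Int) x => d.insert x (d.getD x 0 + 1))
          PySem.Dict.empty :=
      (List.foldl_map (f := fun r => (pvCat r, pvLab r))
        (g := fun (d : PySem.Dict (String × String) Int) x => d.insert x (d.getD x 0 + 1))).symm
    rw [h1, PySem.Dict.foldl_insert_getD_add_one_eq_counter]
  rw [hflat, pvStepB_eq]
  show (((PySem.Dict.counter (pvKs records)).items.foldl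
      (fun o p => pvUpd o p.1.1 (fun b => b.insert p.1.2 p.2)) PySem.Dict.empty)).items.map
      (fun p => (p.1, p.2.items)) = pvNorm records
  have hk := pvFoldUpd_keys (PySem.Dict.counter (pvKs records)).items (fun p => p.1.1)
    (fun p => fun b => b.insert p.1.2 p.2) PySem.Dict.empty
  have hg := pvFoldUpd_getD (PySem.Dict.counter (pvKs records)).items (fun p => p.1.1)
    (fun p => fun b => b.insert p.1.2 p.2)
  have hkeys : ((PySem.Dict.counter (pvKs records)).items.foldl
      (fun o p => pvUpd o p.1.1 (fun b => b.insert p.1.2 p.2)) PySem.Dict.empty).keys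
      = PySem.Set.ofList (records.map pvCat) := by
    rw [hk]
    have h2 : (PySem.Dict.counter (pvKs records)).items.map (fun p => p.1.1)
        = (PySem.Set.ofList (pvKs records)).map (fun k => k.1) := by
      rw [PySem.Dict.items_counter, List.map_map]
      rfl
    have h3 : PySem.Set.ofList ((PySem.Set.ofList (pvKs records)).map (fun k => k.1))
        = PySem.Set.ofList ((pvKs records).map (fun k => k.1)) :=
      pvSet_ofList_map _ _
    have h4 : (pvKs records).map (fun k => k.1) = records.map pvCat := by
      unfold pvKs; rw [List.map_map]; rfl
    rw [h2]
    have := h4 ▸ h3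
    rw [show (PySem.Dict.empty : PySem.Dict String (PySem.Dict String Int)).keys = ([] : List String) from rfl,
      PySem.Set.update_nil_left, this]
  have hnd := hkeys ▸ PySem.Set.nodup_ofList (records.map pvCat)
  rw [PySem.Dict.items_eq_map_keys _ hnd pvDef3, hkeys, List.map_map]
  unfold pvNorm
  apply List.map_congr_left
  intro c _
  simp only [Function.comp_apply]
  rw [hg c PySem.Dict.empty]
  rw [show (PySem.Dict.empty : PySem.Dict String (PySem.Dict String Int)).getD c pvDef3 = pvDef3 from rfl]
  rw [pvBucketB_items records c]

-- ===== VERDICT (by name: the statement is the Claim_ definition above) =====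
theorem tally_refusal_categories_spec : Claim_equal_tally_refusal_categories := by
  intro records _
  unfold Spec_tally_refusal_categories
  rw [pvA_norm, pvB_norm]
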